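-- pv_equiv track=rewrite | github.com/ZJU-DAILY/UniView | code/backend/core/joinCandidate.py | sortRelations
-- ===== SOURCE A (Python) =====
-- def sortRelations(fromRels):
--     relOrder = ["cast_info", "movie_info", "movie_keyword", "name", "char_name", "person_info", "aka_name",
--                 "movie_companies", "title", "movie_info_idx", "aka_title", "company_name", "complete_cast", "keyword",
--                 "movie_link", "info_type", "link_type", "role_type", "kind_type", "comp_cast_type", "company_type"]
--     oldRels = fromRels.split(",")
--     oldCnt = len(oldRels)
--     newRels = " from "
--     cnt = 0
--     for rel in relOrder:
--         if rel in oldRels: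
--             newRels += rel + ","
--             cnt += 1
--             if cnt == oldCnt:
--                 break
--     return newRels[:-1]
-- ===== SOURCE B (Python) =====
-- def sortRelations(fromRels):
--     relOrder = ["cast_info", "movie_info", "movie_keyword", "name", "char_name", "person_info", "aka_name",
--                 "movie_companies", "title", "movie_info_idx", "aka_title", "company_name", "complete_cast", "keyword",
--                 "movie_link", "info_type", "link_type", "role_type", "kind_type", "comp_cast_type", "company_type"]
--     present = sorted(set(fromRels.split(",")) & set(relOrder), key=relOrder.index)
--     newRels = " from "
--     for rel in present:
--         newRels += rel + ","
--     return newRels[:-1]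
-- ===== Notes on version B (the rewrite author's own statement) =====
-- stated objective: alternative
-- what changed: A scans the whole priority table testing list membership with a counter and early break; B computes the set intersection of the input names with the table and sorts it by table index, then joins.
import Mathlib
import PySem

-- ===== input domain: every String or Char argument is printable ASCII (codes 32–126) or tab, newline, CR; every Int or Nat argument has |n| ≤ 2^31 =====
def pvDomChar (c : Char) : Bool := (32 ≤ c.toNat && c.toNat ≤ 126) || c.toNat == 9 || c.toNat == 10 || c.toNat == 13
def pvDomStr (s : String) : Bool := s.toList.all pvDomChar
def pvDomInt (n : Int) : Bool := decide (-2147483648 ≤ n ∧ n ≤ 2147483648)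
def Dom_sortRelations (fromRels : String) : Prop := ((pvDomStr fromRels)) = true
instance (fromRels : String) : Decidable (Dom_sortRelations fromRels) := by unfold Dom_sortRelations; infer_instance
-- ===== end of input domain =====

-- B replaces A's counted scan of the priority table (membership test + early break) by
-- set intersection of the input names with the table, sorted by table index; objective: alternative.

-- ===== PORT A =====
def pvRelOrder : List String :=
  ["cast_info", "movie_info", "movie_keyword", "name", "char_name", "person_info", "aka_name",
   "movie_companies", "title", "movie_info_idx", "aka_title", "company_name", "complete_cast", "keyword",
   "movie_link", "info_type", "link_type", "role_type", "kind_type", "comp_cast_type", "company_type"]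

-- A's for-loop with its counter and early break, as structural recursion over relOrder
def pvSortLoop : List String → List String → Int → Int → String → String
  | [], _, _, _, newRels => newRels
  | rel :: rest, oldRels, cnt, oldCnt, newRels =>
    if oldRels.contains rel then
      let newRels' := newRels ++ (rel ++ ",")
      if cnt + 1 = oldCnt then newRels'
      else pvSortLoop rest oldRels (cnt + 1) oldCnt newRels'
    else pvSortLoop rest oldRels cnt oldCnt newRels

def sortRelations (fromRels : String) : String :=
  let oldRels := (PySem.Str.split? fromRels ",").getD []  -- separator "," ≠ "": split? is always some
  let oldCnt : Int := oldRels.length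
  PySem.Str.slice (pvSortLoop pvRelOrder oldRels 0 oldCnt " from ") none (some (-1))

-- ===== PORT B =====
def sortRelations_alt (fromRels : String) : String :=
  let old := PySem.Set.ofList ((PySem.Str.split? fromRels ",").getD [])  -- separator "," ≠ "": split? is always some
  -- relOrder.index as sort key; every sorted element is in pvRelOrder, so index? is never none
  let present := PySem.List.sorted (PySem.Set.inter old (PySem.Set.ofList pvRelOrder))
      (fun r => (PySem.List.index? pvRelOrder r).getD 0)
  PySem.Str.slice (present.foldl (fun acc rel => acc ++ (rel ++ ",")) " from ") none (some (-1))

-- ===== PRECONDITION & SPEC =====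
def Spec_sortRelations (fromRels : String) (out : String) : Prop := out = sortRelations_alt fromRels
instance (fromRels : String) (out : String) : Decidable (Spec_sortRelations fromRels out) := by unfold Spec_sortRelations; infer_instance

-- ===== CLAIM (what is proved, stated in full; the proofs are below) =====
def Claim_equal_sortRelations : Prop := ∀ (fromRels : String), Dom_sortRelations fromRels → Spec_sortRelations fromRels (sortRelations fromRels)

-- ===== LEMMAS AND PROOFS =====

-- Once the counter reaches len(oldRels), every element of old has been emitted, so no
-- later table entry can still match: the break never hides a match.
theorem pvFullEmit {E old rest : List String} (h : ∀ r ∈ E, r ∈ old)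
    (hnd : (E ++ rest).Nodup) (hlen : E.length = old.length) :
    ∀ r ∈ rest, r ∉ old := by
  intro r hr hro
  have hEnd : E.Nodup := hnd.sublist (List.sublist_append_left _ _)
  have hsub : E.toFinset ⊆ old.toFinset := by
    intro x hx; simp only [List.mem_toFinset] at *; exact h x hx
  have h1 : E.toFinset.card = E.length := List.toFinset_card_of_nodup hEnd
  have h2 : old.toFinset.card ≤ old.length := List.toFinset_card_le old
  have heq : E.toFinset = old.toFinset :=
    Finset.eq_of_subset_of_card_le hsub (by omega)
  have hrE : r ∈ E := by
    have : r ∈ E.toFinset := heq ▸ List.mem_toFinset.mpr hro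
    simpa using this
  exact (List.disjoint_of_nodup_append hnd) hrE hr

-- A's loop computes the fold over the matching suffix of the table
theorem pvSortLoop_eq (old : List String) :
    ∀ (rels emitted : List String) (acc : String),
      (emitted ++ rels).Nodup →
      (∀ r ∈ emitted, r ∈ old) →
      pvSortLoop rels old (emitted.length : Int) (old.length : Int) acc
        = (rels.filter (fun r => old.contains r)).foldl (fun a r => a ++ (r ++ ",")) acc := by
  intro rels
  induction rels with
  | nil => intro emitted acc _ _; simp [pvSortLoop]
  | cons rel rest ih =>
    intro emitted acc hnd hmem
    by_cases hrel : rel ∈ old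
    · by_cases hbr : (emitted.length : Int) + 1 = (old.length : Int)
      · -- break: the rest of the table contains no further match
        have hbn : emitted.length + 1 = old.length := by exact_mod_cast hbr
        have hnone : ∀ r ∈ rest, r ∉ old := by
          refine pvFullEmit (E := emitted ++ [rel]) ?_ ?_ ?_
          · intro r hr
            rcases List.mem_append.mp hr with h | h
            · exact hmem r h
            · simpa using (List.mem_singleton.mp h) ▸ hrel
          · simpa using hnd
          · simp only [List.length_append, List.length_singleton]; omega
        have hfilter : List.filter (fun r => decide (r ∈ old)) rest = [] := by
          rw [List.filter_eq_nil_iff]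
          intro r hr
          simpa using hnone r hr
        simp [pvSortLoop, List.contains_eq_mem, hrel, hbr, hfilter]
      · have hnd' : ((emitted ++ [rel]) ++ rest).Nodup := by simpa using hnd
        have hmem' : ∀ r ∈ emitted ++ [rel], r ∈ old := by
          intro r hr
          rcases List.mem_append.mp hr with h | h
          · exact hmem r h
          · simpa using (List.mem_singleton.mp h) ▸ hrel
        have hih := ih (emitted ++ [rel]) (acc ++ (rel ++ ",")) hnd' hmem'
        simp only [List.length_append, List.length_singleton, List.contains_eq_mem] at hih
        push_cast at hih
        simp [pvSortLoop, List.contains_eq_mem, hrel, hbr, hih]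
    · have hnd' : (emitted ++ rest).Nodup :=
        hnd.sublist ((List.sublist_cons_self rel rest).append_left emitted)
      have hih := ih emitted acc hnd' hmem
      simp only [List.contains_eq_mem] at hih
      simp [pvSortLoop, List.contains_eq_mem, hrel, hih]

-- B's sorted intersection is exactly the matching sublist of the table
theorem pvSorted_eq (xs : List String) :
    PySem.List.sorted (PySem.Set.inter (PySem.Set.ofList xs) (PySem.Set.ofList pvRelOrder))
        (fun r => (PySem.List.index? pvRelOrder r).getD 0)
      = pvRelOrder.filter (fun r => xs.contains r) := by
  apply PySem.List.sorted_eq_of_perm_of_pairwise_lt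
  · -- permutation: both are nodup with the same members
    apply (List.perm_ext_iff_of_nodup ?_ ?_).mpr
    · intro a
      simp [PySem.Set.inter, List.mem_filter, PySem.Set.mem_ofList]
      tauto
    · exact (by decide : pvRelOrder.Nodup).filter _
    · exact (PySem.Set.nodup_ofList xs).filter _
  · -- the table index is strictly increasing along a sublist of the table
    have hp : List.Pairwise
        (fun a b : String =>
          (PySem.List.index? pvRelOrder a).getD 0 < (PySem.List.index? pvRelOrder b).getD 0)
        pvRelOrder := by decide
    exact List.Pairwise.sublist List.filter_sublist hp

-- ===== VERDICT (by name: the statement is the Claim_ definition above) =====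
theorem sortRelations_spec : Claim_equal_sortRelations := by
  intro fromRels _
  unfold Spec_sortRelations sortRelations sortRelations_alt
  have h := pvSortLoop_eq ((PySem.Str.split? fromRels ",").getD []) pvRelOrder [] " from "
    (by simpa using (by decide : pvRelOrder.Nodup)) (by simp)
  simp only [List.length_nil, Nat.cast_zero] at h
  simp only [pvSorted_eq, h]
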